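-- pv_equiv track=rewrite | github.com/DreamWall-Animation/embarker | paintcanvas/layerstack.py | unique_layer_name
-- ===== SOURCE A (Python) =====
-- def unique_layer_name(name, names):
--     if name not in names:
--         return name
--
--     template = '{name} ({n})'
--     i = 1
--     while template.format(name=name, n=i) in names:
--         i += 1
--         continue
--     return template.format(name=name, n=i)
-- ===== SOURCE B (Python) =====
-- def unique_layer_name(name, names):
--     if name not in names:
--         return name
--     prefix = name + ' ('
--     used = set()
--     for s in names:
--         if s.startswith(prefix) and s.endswith(')'):
--             mid = s[len(prefix):-1]
--             if mid.isdigit() and not mid.startswith('0'):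
--                 used.add(mid)
--     i = 1
--     while str(i) in used:
--         i += 1
--     return '{} ({})'.format(name, i)
-- ===== Notes on version B (the rewrite author's own statement) =====
-- stated objective: alternative
-- what changed: Instead of probing 'name (i)' against the list for i = 1, 2, ... (a full list scan per candidate), B makes one pass over names parsing each entry's ' (digits)' suffix (rejecting leading zeros) into a set of taken suffix strings, then returns the first i whose str(i) is not taken.
import Mathlib
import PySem

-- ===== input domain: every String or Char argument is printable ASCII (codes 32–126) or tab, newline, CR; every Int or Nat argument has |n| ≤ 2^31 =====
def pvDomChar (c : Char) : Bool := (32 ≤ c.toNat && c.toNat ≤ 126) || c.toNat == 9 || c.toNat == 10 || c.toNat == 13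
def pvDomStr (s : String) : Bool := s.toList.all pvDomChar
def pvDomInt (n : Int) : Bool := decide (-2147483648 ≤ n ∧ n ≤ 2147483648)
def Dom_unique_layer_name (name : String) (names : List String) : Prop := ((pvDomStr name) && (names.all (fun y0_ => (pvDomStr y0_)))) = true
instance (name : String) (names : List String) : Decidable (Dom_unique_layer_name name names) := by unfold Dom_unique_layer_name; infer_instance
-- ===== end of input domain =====

-- B replaces A's repeated membership probes (one list scan per candidate index) by one
-- pass that parses the taken " (k)" suffixes into a set, then takes the first free index
-- (objective: alternative algorithm, same observable result).

-- ===== PORT A =====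
-- shared formatting helper: A's template.format(name=name, n=i) and B's '{} ({})'.format(name, i)
def pvFmt (name : List Char) (i : Int) : List Char :=
  name ++ [' ', '('] ++ PySem.Int.toChars i ++ [')']

-- 'while template.format(...) in names: i += 1'; fuel names.length+1 always suffices
-- (the candidates tried are pairwise distinct), so the fuel-0 value is never reached on a run.
def pvLoopA (name : List Char) (nl : List (List Char)) : Nat → Int → List Char
  | 0, i => pvFmt name i
  | fuel+1, i => if pvFmt name i ∈ nl then pvLoopA name nl fuel (i+1) else pvFmt name i

def unique_layer_name (name : String) (names : List String) : String :=
  let nl := names.map String.toList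
  if name.toList ∈ nl then String.ofList (pvLoopA name.toList nl (names.length + 1) 1)
  else name

-- ===== PORT B =====
-- body of B's collection loop: startswith/endswith guard, mid = s[len(prefix):-1],
-- keep mid when it is a digit string without a leading zero
def pvUsedStep (pre : List Char) (used : PySem.Set (List Char)) (s : List Char) :
    PySem.Set (List Char) :=
  if PySem.Chars.startswith s pre && PySem.Chars.endswith s [')'] then
    let mid := PySem.List.slice s (some (pre.length : Int)) (some (-1))
    if PySem.Chars.strIsdigit mid && !PySem.Chars.startswith mid ['0'] then used.add mid
    else used
  else used

-- 'while str(i) in used: i += 1' with the same fuel discipline as A's loop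
def pvLoopB (name : List Char) (used : PySem.Set (List Char)) : Nat → Int → List Char
  | 0, i => pvFmt name i
  | fuel+1, i =>
      if PySem.Int.toChars i ∈ used then pvLoopB name used fuel (i+1) else pvFmt name i

def unique_layer_name_alt (name : String) (names : List String) : String :=
  let nl := names.map String.toList
  if name.toList ∈ nl then
    let pre := name.toList ++ [' ', '(']
    let used := nl.foldl (pvUsedStep pre) PySem.Set.empty
    String.ofList (pvLoopB name.toList used (names.length + 1) 1)
  else name

-- ===== PRECONDITION & SPEC =====
def Spec_unique_layer_name (name : String) (names : List String) (out : String) : Prop := out = unique_layer_name_alt name names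
instance (name : String) (names : List String) (out : String) : Decidable (Spec_unique_layer_name name names out) := by unfold Spec_unique_layer_name; infer_instance

-- ===== CLAIM (what is proved, stated in full; the proofs are below) =====
def Claim_equal_unique_layer_name : Prop := ∀ (name : String) (names : List String), Dom_unique_layer_name name names → Spec_unique_layer_name name names (unique_layer_name name names)

-- ===== LEMMAS AND PROOFS =====

-- xs[k:-1] = drop k then drop the last element
theorem pv_slice_negone {α : Type} (xs : List α) (k : Nat) :
    PySem.List.slice xs (some (k : Int)) (some (-1)) = (xs.drop k).dropLast := by
  simp only [PySem.List.slice, PySem.List.clampIdx]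
  rw [if_neg (by omega : ¬ ((k : Int) < 0)), if_pos (by omega : (-1 : Int) < 0),
    Int.toNat_natCast]
  rcases Nat.eq_zero_or_pos xs.length with h0 | h0
  · have hnil : xs = [] := List.eq_nil_of_length_eq_zero h0
    subst hnil; simp
  · rw [if_neg (by omega : ¬ ((xs.length : Int) + -1 < 0))]
    have hb : ((xs.length : Int) + -1).toNat = xs.length - 1 := by omega
    rw [hb, List.dropLast_eq_take, List.length_drop]
    by_cases hkl : k ≤ xs.length
    · rw [min_eq_left hkl]; congr 1; omega
    · rw [min_eq_right (by omega), List.drop_eq_nil_of_le (le_refl _),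
        List.drop_eq_nil_of_le (by omega : xs.length ≤ k)]
      simp

theorem pv_isdigit_toDigits {n : Nat} {c : Char} (hc : c ∈ Nat.toDigits 10 n) :
    PySem.Chars.isdigit c = true := by
  have h := Nat.isDigit_of_mem_toDigits (by norm_num) (by norm_num) hc
  simp only [Char.isDigit] at h
  simp only [PySem.Chars.isdigit, Bool.and_eq_true, decide_eq_true_eq, Char.le_def]
  rcases Bool.and_eq_true_iff.mp h with ⟨h1, h2⟩
  exact ⟨by simpa using h1, by simpa using h2⟩

theorem pv_strIsdigit_toDigits (n : Nat) :
    PySem.Chars.strIsdigit (Nat.toDigits 10 n) = true := by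
  have hlen : 0 < (Nat.toDigits 10 n).length := Nat.length_toDigits_pos
  simp only [PySem.Chars.strIsdigit, Bool.and_eq_true, List.all_eq_true]
  refine ⟨by simp; intro h; simp [h] at hlen, ?_⟩
  intro c hc; exact pv_isdigit_toDigits hc

theorem pv_head_toDigits_ne_zero (n : Nat) (hn : 1 ≤ n) :
    ¬ ('0' :: []) <+: Nat.toDigits 10 n := by
  induction n using Nat.strong_induction_on with
  | _ n ih =>
    rw [Nat.toDigits_eq_if (by norm_num)]
    by_cases h : n < 10
    · simp only [if_pos h]
      rintro ⟨t, ht⟩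
      simp only [List.cons_append, List.nil_append, List.cons.injEq] at ht
      interval_cases n <;> exact absurd ht.1 (by decide)
    · simp only [if_neg h]
      rintro ⟨t, ht⟩
      cases hx : Nat.toDigits 10 (n / 10) with
      | nil =>
        have hl : 0 < (Nat.toDigits 10 (n / 10)).length := Nat.length_toDigits_pos
        rw [hx] at hl; simp at hl
      | cons d ds =>
        rw [hx] at ht
        simp only [List.cons_append, List.nil_append, List.cons.injEq] at ht
        exact ih (n / 10) (by omega) (by omega) ⟨ds, by rw [hx, ← ht.1]; rfl⟩

theorem pv_toChars_of_pos (i : Int) (hi : 1 ≤ i) :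
    PySem.Int.toChars i = Nat.toDigits 10 i.toNat := by
  simp [PySem.Int.toChars, not_lt.mpr (by omega : (0:Int) ≤ i)]

theorem pvUsedStep_def (pre : List Char) (used : PySem.Set (List Char)) (s : List Char) :
    pvUsedStep pre used s =
      if (PySem.Chars.startswith s pre && PySem.Chars.endswith s [')']) = true then
        if (PySem.Chars.strIsdigit (PySem.List.slice s (some (pre.length : Int)) (some (-1))) &&
            !PySem.Chars.startswith (PySem.List.slice s (some (pre.length : Int)) (some (-1))) ['0']) = true then
          used.add (PySem.List.slice s (some (pre.length : Int)) (some (-1)))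
        else used
      else used := rfl

-- membership in B's used set, characterised over the source list
theorem pv_mem_foldl_used (pre : List Char) (nl : List (List Char))
    (acc : PySem.Set (List Char)) (x : List Char) :
    x ∈ nl.foldl (pvUsedStep pre) acc ↔
      x ∈ acc ∨ ∃ s ∈ nl,
        (PySem.Chars.startswith s pre && PySem.Chars.endswith s [')']) = true ∧
        (PySem.Chars.strIsdigit (PySem.List.slice s (some (pre.length : Int)) (some (-1))) &&
          !PySem.Chars.startswith (PySem.List.slice s (some (pre.length : Int)) (some (-1))) ['0']) = true ∧
        PySem.List.slice s (some (pre.length : Int)) (some (-1)) = x := by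
  induction nl generalizing acc with
  | nil => simp
  | cons s rest ih =>
    simp only [List.foldl_cons, ih, List.mem_cons]
    constructor
    · rintro (hx | ⟨t, ht, h1, h2, h3⟩)
      · rw [pvUsedStep_def] at hx
        split at hx
        · split at hx
          · rcases (PySem.Set.mem_add _ _ _).mp hx with hx | hx
            · exact Or.inl hx
            · exact Or.inr ⟨s, Or.inl rfl, by assumption, by assumption, hx.symm⟩
          · exact Or.inl hx
        · exact Or.inl hx
      · exact Or.inr ⟨t, Or.inr ht, h1, h2, h3⟩
    · rintro (hx | ⟨t, (rfl | ht), h1, h2, h3⟩)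
      · left
        rw [pvUsedStep_def]
        split
        · split
          · exact (PySem.Set.mem_add _ _ _).mpr (Or.inl hx)
          · exact hx
        · exact hx
      · left
        rw [pvUsedStep_def, if_pos h1, if_pos h2]
        exact (PySem.Set.mem_add _ _ _).mpr (Or.inr h3.symm)
      · exact Or.inr ⟨t, ht, h1, h2, h3⟩

-- the central fact: for i ≥ 1, "name (i)" occurs in names iff str(i) was collected
theorem pv_key (name : List Char) (nl : List (List Char)) (i : Int) (hi : 1 ≤ i) :
    pvFmt name i ∈ nl ↔
      PySem.Int.toChars i ∈ nl.foldl (pvUsedStep (name ++ [' ', '('])) PySem.Set.empty := by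
  set pre := name ++ [' ', '('] with hpre
  rw [pv_mem_foldl_used]
  simp only [PySem.Set.empty, List.not_mem_nil, false_or]
  constructor
  · intro hmem
    refine ⟨pvFmt name i, hmem, ?_, ?_, ?_⟩
    · simp only [pvFmt, Bool.and_eq_true, PySem.Chars.startswith_iff, PySem.Chars.endswith_iff]
      constructor
      · exact ⟨PySem.Int.toChars i ++ [')'], by simp [hpre]⟩
      · exact ⟨name ++ [' ', '('] ++ PySem.Int.toChars i, by simp⟩
    · have hmid : PySem.List.slice (pvFmt name i) (some (pre.length : Int)) (some (-1)) =
          PySem.Int.toChars i := by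
        rw [pv_slice_negone]
        have : pvFmt name i = pre ++ (PySem.Int.toChars i ++ [')']) := by
          simp [pvFmt, hpre]
        rw [this, List.drop_left, List.dropLast_concat]
      rw [hmid, pv_toChars_of_pos i hi]
      simp only [Bool.and_eq_true, Bool.not_eq_true']
      refine ⟨pv_strIsdigit_toDigits _, ?_⟩
      rw [Bool.eq_false_iff]
      intro hsw
      exact pv_head_toDigits_ne_zero i.toNat (by omega)
        ((PySem.Chars.startswith_iff _ _).mp hsw)
    · rw [pv_slice_negone]
      have : pvFmt name i = pre ++ (PySem.Int.toChars i ++ [')']) := by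
        simp [pvFmt, hpre]
      rw [this, List.drop_left, List.dropLast_concat]
  · rintro ⟨s, hs, h1, h2, h3⟩
    rcases Bool.and_eq_true_iff.mp h1 with ⟨hsw, hew⟩
    rcases Bool.and_eq_true_iff.mp h2 with ⟨hdig, _⟩
    rcases (PySem.Chars.startswith_iff _ _).mp hsw with ⟨t, ht⟩
    have hmid : PySem.List.slice s (some (pre.length : Int)) (some (-1)) = t.dropLast := by
      rw [pv_slice_negone, ← ht, List.drop_left]
    have htne : t ≠ [] := by
      intro hcon
      rw [hcon] at hmid
      rw [hmid] at hdig
      simp [PySem.Chars.strIsdigit] at hdig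
    rcases (PySem.Chars.endswith_iff _ _).mp hew with ⟨u, hu⟩
    -- s = pre ++ t and s ends in ')', t ≠ [], so t = t.dropLast ++ [')']
    have hlast : t = t.dropLast ++ [')'] := by
      have h1' : (pre ++ t).dropLast = pre ++ t.dropLast :=
        List.dropLast_append_of_ne_nil htne
      have h2' : (u ++ [')']).dropLast = u := List.dropLast_concat
      have hsu : pre ++ t.dropLast = u := by rw [← h1', ht, ← hu, h2']
      have : pre ++ t = pre ++ (t.dropLast ++ [')']) := by
        rw [ht, ← hu, ← hsu]; simp
      exact (List.append_cancel_left this)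
    have : s = pre ++ (PySem.Int.toChars i ++ [')']) := by
      rw [← ht, hlast]
      rw [hmid] at h3
      rw [h3]
    have hfmt : pvFmt name i = pre ++ (PySem.Int.toChars i ++ [')']) := by
      simp [pvFmt, hpre]
    rw [hfmt, ← this]
    exact hs

theorem pv_loops_eq (name : List Char) (nl : List (List Char)) (used : PySem.Set (List Char))
    (h : ∀ i : Int, 1 ≤ i → (pvFmt name i ∈ nl ↔ PySem.Int.toChars i ∈ used)) :
    ∀ (fuel : Nat) (i : Int), 1 ≤ i → pvLoopA name nl fuel i = pvLoopB name used fuel i := by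
  intro fuel
  induction fuel with
  | zero => intro i _; rfl
  | succ f ih =>
    intro i hi
    simp only [pvLoopA, pvLoopB]
    by_cases hc : pvFmt name i ∈ nl
    · rw [if_pos hc, if_pos ((h i hi).mp hc)]
      · exact ih (i + 1) (by omega)
    · rw [if_neg hc, if_neg (fun hcon => hc ((h i hi).mpr hcon))]

-- ===== VERDICT (by name: the statement is the Claim_ definition above) =====
theorem unique_layer_name_spec : Claim_equal_unique_layer_name := by
  intro name names _
  unfold Spec_unique_layer_name unique_layer_name unique_layer_name_alt
  by_cases hm : name.toList ∈ names.map String.toList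
  · rw [if_pos hm, if_pos hm]
    congr 1
    exact pv_loops_eq name.toList (names.map String.toList) _
      (fun i hi => pv_key name.toList (names.map String.toList) i hi)
      (names.length + 1) 1 (by omega)
  · rw [if_neg hm, if_neg hm]
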